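-- pv_equiv track=rewrite | github.com/Glasgow-AI4BioMed/BPP | src/data_processing/extract_data_form_reactome.py | get_entity_status_dic
-- ===== SOURCE A (Python) =====
-- def get_entity_status_dic(entity_index_to_list_of_relationships_dic) -> {str: int}:
--     entity_to_relationship_status_dic: {str: int} = {"total_num_of_entities": 0,
--                                                      "num_of_entities_with_one_relationship": 0,
--                                                      "num_of_entities_with_two_relationships": 0,
--                                                      "num_of_entities_with_three_relationships": 0,
--                                                      "num_of_entities_with_four_relationships": 0,
--                                                      "num_of_entities_with_five_relationships": 0,
--                                                      "num_of_entities_with_six_relationships": 0,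
--                                                      "num_of_entities_with_seven_relationships": 0,
--                                                      "num_of_entities_with_eight_relationships": 0,
--                                                      "num_of_entities_with_more_than_eight_relationships": 0}
--
--     dic_key_name: {int: str} = {1: "num_of_entities_with_one_relationship",
--                                 2: "num_of_entities_with_two_relationships",
--                                 3: "num_of_entities_with_three_relationships",
--                                 4: "num_of_entities_with_four_relationships",
--                                 5: "num_of_entities_with_five_relationships",
--                                 6: "num_of_entities_with_six_relationships",
--                                 7: "num_of_entities_with_seven_relationships",
--                                 8: "num_of_entities_with_eight_relationships"}
--
--     entity_to_relationship_status_dic["total_num_of_entities"] = len(entity_index_to_list_of_relationships_dic)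
--
--     for entity_index, list_of_relationships in entity_index_to_list_of_relationships_dic.items():
--         num_of_relationships = len(list_of_relationships)
--         if num_of_relationships in dic_key_name.keys():
--             key_name = dic_key_name.get(num_of_relationships)
--             temp_val = entity_to_relationship_status_dic.get(key_name)
--             entity_to_relationship_status_dic[dic_key_name.get(len(list_of_relationships))] = temp_val + 1
--         else:
--             temp_val = entity_to_relationship_status_dic.get(
--                 "num_of_entities_with_more_than_eight_relationships")
--             entity_to_relationship_status_dic[
--                 "num_of_entities_with_more_than_eight_relationships"] = temp_val + 1
--
--     return entity_to_relationship_status_dic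
-- ===== SOURCE B (Python) =====
-- def get_entity_status_dic(entity_index_to_list_of_relationships_dic) -> {str: int}:
--     # Count each bucket by an independent .count() scan over the list of lengths,
--     # and get the overflow bucket (which also absorbs zero-relationship entities,
--     # as in the original) by subtraction; the result is a single dict literal.
--     lengths = [len(v) for v in entity_index_to_list_of_relationships_dic.values()]
--     c1, c2, c3, c4, c5, c6, c7, c8 = (lengths.count(i) for i in range(1, 9))
--     return {
--         "total_num_of_entities": len(lengths),
--         "num_of_entities_with_one_relationship": c1,
--         "num_of_entities_with_two_relationships": c2,
--         "num_of_entities_with_three_relationships": c3,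
--         "num_of_entities_with_four_relationships": c4,
--         "num_of_entities_with_five_relationships": c5,
--         "num_of_entities_with_six_relationships": c6,
--         "num_of_entities_with_seven_relationships": c7,
--         "num_of_entities_with_eight_relationships": c8,
--         "num_of_entities_with_more_than_eight_relationships":
--             len(lengths) - (c1 + c2 + c3 + c4 + c5 + c6 + c7 + c8),
--     }
-- ===== Notes on version B (the rewrite author's own statement) =====
-- stated objective: simpler
-- what changed: B replaces A's single pass that mutates a named-key status dict (membership test against a parallel int-to-name dict, lookup, re-insert) by per-bucket .count() scans over the list of relationship-list lengths plus a subtraction for the overflow bucket, returning one dict literal with no mutable accumulator.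
import Mathlib
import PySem

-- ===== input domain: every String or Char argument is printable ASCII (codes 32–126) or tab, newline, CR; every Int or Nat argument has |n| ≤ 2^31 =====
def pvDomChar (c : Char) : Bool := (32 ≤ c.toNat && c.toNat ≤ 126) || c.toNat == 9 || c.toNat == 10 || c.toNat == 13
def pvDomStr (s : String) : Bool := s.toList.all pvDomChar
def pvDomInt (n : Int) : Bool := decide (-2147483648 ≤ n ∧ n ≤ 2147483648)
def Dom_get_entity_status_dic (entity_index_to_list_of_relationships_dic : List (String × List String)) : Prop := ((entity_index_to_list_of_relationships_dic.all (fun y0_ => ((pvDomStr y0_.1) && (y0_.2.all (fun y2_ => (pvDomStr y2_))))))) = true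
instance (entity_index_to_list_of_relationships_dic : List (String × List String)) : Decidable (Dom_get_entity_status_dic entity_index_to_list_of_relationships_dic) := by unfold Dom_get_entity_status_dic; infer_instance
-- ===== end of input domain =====

-- B replaces A's single stateful pass over the entities (named-key lookup-and-increment in a
-- mutable status dict) by independent per-bucket .count() scans over the list of lengths plus a
-- subtraction for the overflow bucket, returned as one dict literal; objective: simpler (same O(n)).

-- ===== PORT A =====
-- the table dic_key_name (a dict constant inside A, kept as a helper)
def pvKeyNameDict : PySem.Dict Int String := PySem.Dict.ofList
  [(1, "num_of_entities_with_one_relationship"),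
   (2, "num_of_entities_with_two_relationships"),
   (3, "num_of_entities_with_three_relationships"),
   (4, "num_of_entities_with_four_relationships"),
   (5, "num_of_entities_with_five_relationships"),
   (6, "num_of_entities_with_six_relationships"),
   (7, "num_of_entities_with_seven_relationships"),
   (8, "num_of_entities_with_eight_relationships")]

-- Python's dict.get returns Optional; in A both .get calls sit under a membership/initialised-key
-- guard so the value is always present — ported as get?/getD with a never-used default.
def get_entity_status_dic (entity_index_to_list_of_relationships_dic : List (String × List String)) : List (String × Int) :=
  let d : PySem.Dict String Int := PySem.Dict.ofList
    [("total_num_of_entities", 0),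
     ("num_of_entities_with_one_relationship", 0),
     ("num_of_entities_with_two_relationships", 0),
     ("num_of_entities_with_three_relationships", 0),
     ("num_of_entities_with_four_relationships", 0),
     ("num_of_entities_with_five_relationships", 0),
     ("num_of_entities_with_six_relationships", 0),
     ("num_of_entities_with_seven_relationships", 0),
     ("num_of_entities_with_eight_relationships", 0),
     ("num_of_entities_with_more_than_eight_relationships", 0)]
  let d := d.insert "total_num_of_entities" (entity_index_to_list_of_relationships_dic.length : Int)
  let d := entity_index_to_list_of_relationships_dic.foldl (fun d p =>
    let num_of_relationships : Int := (p.2.length : Int)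
    if pvKeyNameDict.contains num_of_relationships then
      let key_name : String := (pvKeyNameDict.get? num_of_relationships).getD ""
      let temp_val : Int := d.getD key_name 0
      d.insert ((pvKeyNameDict.get? ((p.2.length : Int))).getD "") (temp_val + 1)
    else
      let temp_val : Int := d.getD "num_of_entities_with_more_than_eight_relationships" 0
      d.insert "num_of_entities_with_more_than_eight_relationships" (temp_val + 1)) d
  d.items

-- ===== PORT B =====
def get_entity_status_dic_alt (entity_index_to_list_of_relationships_dic : List (String × List String)) : List (String × Int) :=
  let lengths : List Int := entity_index_to_list_of_relationships_dic.map (fun p => (p.2.length : Int))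
  let c1 : Int := (PySem.List.count lengths 1 : Int)
  let c2 : Int := (PySem.List.count lengths 2 : Int)
  let c3 : Int := (PySem.List.count lengths 3 : Int)
  let c4 : Int := (PySem.List.count lengths 4 : Int)
  let c5 : Int := (PySem.List.count lengths 5 : Int)
  let c6 : Int := (PySem.List.count lengths 6 : Int)
  let c7 : Int := (PySem.List.count lengths 7 : Int)
  let c8 : Int := (PySem.List.count lengths 8 : Int)
  [("total_num_of_entities", (lengths.length : Int)),
   ("num_of_entities_with_one_relationship", c1),
   ("num_of_entities_with_two_relationships", c2),
   ("num_of_entities_with_three_relationships", c3),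
   ("num_of_entities_with_four_relationships", c4),
   ("num_of_entities_with_five_relationships", c5),
   ("num_of_entities_with_six_relationships", c6),
   ("num_of_entities_with_seven_relationships", c7),
   ("num_of_entities_with_eight_relationships", c8),
   ("num_of_entities_with_more_than_eight_relationships",
     (lengths.length : Int) - (c1 + c2 + c3 + c4 + c5 + c6 + c7 + c8))]

-- ===== PRECONDITION & SPEC =====
def Spec_get_entity_status_dic (entity_index_to_list_of_relationships_dic : List (String × List String)) (out : List (String × Int)) : Prop := out = get_entity_status_dic_alt entity_index_to_list_of_relationships_dic
instance (entity_index_to_list_of_relationships_dic : List (String × List String)) (out : List (String × Int)) : Decidable (Spec_get_entity_status_dic entity_index_to_list_of_relationships_dic out) := by unfold Spec_get_entity_status_dic; infer_instance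

-- ===== CLAIM (what is proved, stated in full; the proofs are below) =====
def Claim_equal_get_entity_status_dic : Prop := ∀ (entity_index_to_list_of_relationships_dic : List (String × List String)), Dom_get_entity_status_dic entity_index_to_list_of_relationships_dic → Spec_get_entity_status_dic entity_index_to_list_of_relationships_dic (get_entity_status_dic entity_index_to_list_of_relationships_dic)

-- ===== LEMMAS AND PROOFS =====

-- the bucket label of one entity (used only by the proofs): its length when 1..8, else 0
def pvBucket (rels : List String) : Int :=
  if 1 ≤ (rels.length : Int) ∧ (rels.length : Int) ≤ 8 then (rels.length : Int) else 0

-- helper used only by the proofs: A's mutable status dict with symbolic values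
def pvMk (t v1 v2 v3 v4 v5 v6 v7 v8 v9 : Int) : PySem.Dict String Int := PySem.Dict.mk
    [("total_num_of_entities", t), ("num_of_entities_with_one_relationship", v1), ("num_of_entities_with_two_relationships", v2), ("num_of_entities_with_three_relationships", v3), ("num_of_entities_with_four_relationships", v4), ("num_of_entities_with_five_relationships", v5), ("num_of_entities_with_six_relationships", v6), ("num_of_entities_with_seven_relationships", v7), ("num_of_entities_with_eight_relationships", v8), ("num_of_entities_with_more_than_eight_relationships", v9)]

theorem pvKeyNameDict_mk : pvKeyNameDict = PySem.Dict.mk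
  [(1, "num_of_entities_with_one_relationship"), (2, "num_of_entities_with_two_relationships"), (3, "num_of_entities_with_three_relationships"), (4, "num_of_entities_with_four_relationships"), (5, "num_of_entities_with_five_relationships"), (6, "num_of_entities_with_six_relationships"), (7, "num_of_entities_with_seven_relationships"), (8, "num_of_entities_with_eight_relationships")] := by rfl

-- A's loop characterised: folding l over the status dict adds to each named bucket the number
-- of entries of l whose pvBucket label selects that key.
theorem pv_foldA_char (l : List (String × List String)) (t v1 v2 v3 v4 v5 v6 v7 v8 v9 : Int) :
    (l.foldl (fun d (p : String × List String) =>
      let num_of_relationships : Int := (p.2.length : Int)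
      if pvKeyNameDict.contains num_of_relationships then
        let key_name : String := (pvKeyNameDict.get? num_of_relationships).getD ""
        let temp_val : Int := d.getD key_name 0
        d.insert ((pvKeyNameDict.get? ((p.2.length : Int))).getD "") (temp_val + 1)
      else
        let temp_val : Int := d.getD "num_of_entities_with_more_than_eight_relationships" 0
        d.insert "num_of_entities_with_more_than_eight_relationships" (temp_val + 1))
      (pvMk t v1 v2 v3 v4 v5 v6 v7 v8 v9)) = pvMk t (v1 + ((l.map (fun p => pvBucket p.2)).count 1 : Int)) (v2 + ((l.map (fun p => pvBucket p.2)).count 2 : Int)) (v3 + ((l.map (fun p => pvBucket p.2)).count 3 : Int)) (v4 + ((l.map (fun p => pvBucket p.2)).count 4 : Int)) (v5 + ((l.map (fun p => pvBucket p.2)).count 5 : Int)) (v6 + ((l.map (fun p => pvBucket p.2)).count 6 : Int)) (v7 + ((l.map (fun p => pvBucket p.2)).count 7 : Int)) (v8 + ((l.map (fun p => pvBucket p.2)).count 8 : Int)) (v9 + ((l.map (fun p => pvBucket p.2)).count 0 : Int)) := by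
  induction l generalizing t v1 v2 v3 v4 v5 v6 v7 v8 v9 with
  | nil => simp
  | cons p l ih =>
    rcases (show p.2.length = 1 ∨ p.2.length = 2 ∨ p.2.length = 3 ∨ p.2.length = 4 ∨
        p.2.length = 5 ∨ p.2.length = 6 ∨ p.2.length = 7 ∨ p.2.length = 8 ∨
        p.2.length = 0 ∨ 9 ≤ p.2.length from by omega) with h|h|h|h|h|h|h|h|h|h
    · have hstep : (let num_of_relationships : Int := (p.2.length : Int)
        if pvKeyNameDict.contains num_of_relationships then
          let key_name : String := (pvKeyNameDict.get? num_of_relationships).getD ""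
          let temp_val : Int := (pvMk t v1 v2 v3 v4 v5 v6 v7 v8 v9).getD key_name 0
          (pvMk t v1 v2 v3 v4 v5 v6 v7 v8 v9).insert ((pvKeyNameDict.get? ((p.2.length : Int))).getD "") (temp_val + 1)
        else
          let temp_val : Int := (pvMk t v1 v2 v3 v4 v5 v6 v7 v8 v9).getD "num_of_entities_with_more_than_eight_relationships" 0
          (pvMk t v1 v2 v3 v4 v5 v6 v7 v8 v9).insert "num_of_entities_with_more_than_eight_relationships" (temp_val + 1)) = pvMk t (v1+1) v2 v3 v4 v5 v6 v7 v8 v9 := by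
        apply PySem.Dict.ext
        simp [pvMk, h, pvKeyNameDict_mk, PySem.Dict.items_insert, PySem.Dict.getD,
          PySem.Dict.get?, PySem.Dict.contains]
      rw [List.foldl_cons, hstep, ih]
      have hb : pvBucket p.2 = 1 := by simp [pvBucket, h]
      simp [pvMk, List.map_cons, hb]
      omega
    · have hstep : (let num_of_relationships : Int := (p.2.length : Int)
        if pvKeyNameDict.contains num_of_relationships then
          let key_name : String := (pvKeyNameDict.get? num_of_relationships).getD ""
          let temp_val : Int := (pvMk t v1 v2 v3 v4 v5 v6 v7 v8 v9).getD key_name 0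
          (pvMk t v1 v2 v3 v4 v5 v6 v7 v8 v9).insert ((pvKeyNameDict.get? ((p.2.length : Int))).getD "") (temp_val + 1)
        else
          let temp_val : Int := (pvMk t v1 v2 v3 v4 v5 v6 v7 v8 v9).getD "num_of_entities_with_more_than_eight_relationships" 0
          (pvMk t v1 v2 v3 v4 v5 v6 v7 v8 v9).insert "num_of_entities_with_more_than_eight_relationships" (temp_val + 1)) = pvMk t v1 (v2+1) v3 v4 v5 v6 v7 v8 v9 := by
        apply PySem.Dict.ext
        simp [pvMk, h, pvKeyNameDict_mk, PySem.Dict.items_insert, PySem.Dict.getD,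
          PySem.Dict.get?, PySem.Dict.contains]
      rw [List.foldl_cons, hstep, ih]
      have hb : pvBucket p.2 = 2 := by simp [pvBucket, h]
      simp [pvMk, List.map_cons, hb]
      omega
    · have hstep : (let num_of_relationships : Int := (p.2.length : Int)
        if pvKeyNameDict.contains num_of_relationships then
          let key_name : String := (pvKeyNameDict.get? num_of_relationships).getD ""
          let temp_val : Int := (pvMk t v1 v2 v3 v4 v5 v6 v7 v8 v9).getD key_name 0
          (pvMk t v1 v2 v3 v4 v5 v6 v7 v8 v9).insert ((pvKeyNameDict.get? ((p.2.length : Int))).getD "") (temp_val + 1)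
        else
          let temp_val : Int := (pvMk t v1 v2 v3 v4 v5 v6 v7 v8 v9).getD "num_of_entities_with_more_than_eight_relationships" 0
          (pvMk t v1 v2 v3 v4 v5 v6 v7 v8 v9).insert "num_of_entities_with_more_than_eight_relationships" (temp_val + 1)) = pvMk t v1 v2 (v3+1) v4 v5 v6 v7 v8 v9 := by
        apply PySem.Dict.ext
        simp [pvMk, h, pvKeyNameDict_mk, PySem.Dict.items_insert, PySem.Dict.getD,
          PySem.Dict.get?, PySem.Dict.contains]
      rw [List.foldl_cons, hstep, ih]
      have hb : pvBucket p.2 = 3 := by simp [pvBucket, h]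
      simp [pvMk, List.map_cons, hb]
      omega
    · have hstep : (let num_of_relationships : Int := (p.2.length : Int)
        if pvKeyNameDict.contains num_of_relationships then
          let key_name : String := (pvKeyNameDict.get? num_of_relationships).getD ""
          let temp_val : Int := (pvMk t v1 v2 v3 v4 v5 v6 v7 v8 v9).getD key_name 0
          (pvMk t v1 v2 v3 v4 v5 v6 v7 v8 v9).insert ((pvKeyNameDict.get? ((p.2.length : Int))).getD "") (temp_val + 1)
        else
          let temp_val : Int := (pvMk t v1 v2 v3 v4 v5 v6 v7 v8 v9).getD "num_of_entities_with_more_than_eight_relationships" 0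
          (pvMk t v1 v2 v3 v4 v5 v6 v7 v8 v9).insert "num_of_entities_with_more_than_eight_relationships" (temp_val + 1)) = pvMk t v1 v2 v3 (v4+1) v5 v6 v7 v8 v9 := by
        apply PySem.Dict.ext
        simp [pvMk, h, pvKeyNameDict_mk, PySem.Dict.items_insert, PySem.Dict.getD,
          PySem.Dict.get?, PySem.Dict.contains]
      rw [List.foldl_cons, hstep, ih]
      have hb : pvBucket p.2 = 4 := by simp [pvBucket, h]
      simp [pvMk, List.map_cons, hb]
      omega
    · have hstep : (let num_of_relationships : Int := (p.2.length : Int)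
        if pvKeyNameDict.contains num_of_relationships then
          let key_name : String := (pvKeyNameDict.get? num_of_relationships).getD ""
          let temp_val : Int := (pvMk t v1 v2 v3 v4 v5 v6 v7 v8 v9).getD key_name 0
          (pvMk t v1 v2 v3 v4 v5 v6 v7 v8 v9).insert ((pvKeyNameDict.get? ((p.2.length : Int))).getD "") (temp_val + 1)
        else
          let temp_val : Int := (pvMk t v1 v2 v3 v4 v5 v6 v7 v8 v9).getD "num_of_entities_with_more_than_eight_relationships" 0
          (pvMk t v1 v2 v3 v4 v5 v6 v7 v8 v9).insert "num_of_entities_with_more_than_eight_relationships" (temp_val + 1)) = pvMk t v1 v2 v3 v4 (v5+1) v6 v7 v8 v9 := by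
        apply PySem.Dict.ext
        simp [pvMk, h, pvKeyNameDict_mk, PySem.Dict.items_insert, PySem.Dict.getD,
          PySem.Dict.get?, PySem.Dict.contains]
      rw [List.foldl_cons, hstep, ih]
      have hb : pvBucket p.2 = 5 := by simp [pvBucket, h]
      simp [pvMk, List.map_cons, hb]
      omega
    · have hstep : (let num_of_relationships : Int := (p.2.length : Int)
        if pvKeyNameDict.contains num_of_relationships then
          let key_name : String := (pvKeyNameDict.get? num_of_relationships).getD ""
          let temp_val : Int := (pvMk t v1 v2 v3 v4 v5 v6 v7 v8 v9).getD key_name 0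
          (pvMk t v1 v2 v3 v4 v5 v6 v7 v8 v9).insert ((pvKeyNameDict.get? ((p.2.length : Int))).getD "") (temp_val + 1)
        else
          let temp_val : Int := (pvMk t v1 v2 v3 v4 v5 v6 v7 v8 v9).getD "num_of_entities_with_more_than_eight_relationships" 0
          (pvMk t v1 v2 v3 v4 v5 v6 v7 v8 v9).insert "num_of_entities_with_more_than_eight_relationships" (temp_val + 1)) = pvMk t v1 v2 v3 v4 v5 (v6+1) v7 v8 v9 := by
        apply PySem.Dict.ext
        simp [pvMk, h, pvKeyNameDict_mk, PySem.Dict.items_insert, PySem.Dict.getD,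
          PySem.Dict.get?, PySem.Dict.contains]
      rw [List.foldl_cons, hstep, ih]
      have hb : pvBucket p.2 = 6 := by simp [pvBucket, h]
      simp [pvMk, List.map_cons, hb]
      omega
    · have hstep : (let num_of_relationships : Int := (p.2.length : Int)
        if pvKeyNameDict.contains num_of_relationships then
          let key_name : String := (pvKeyNameDict.get? num_of_relationships).getD ""
          let temp_val : Int := (pvMk t v1 v2 v3 v4 v5 v6 v7 v8 v9).getD key_name 0
          (pvMk t v1 v2 v3 v4 v5 v6 v7 v8 v9).insert ((pvKeyNameDict.get? ((p.2.length : Int))).getD "") (temp_val + 1)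
        else
          let temp_val : Int := (pvMk t v1 v2 v3 v4 v5 v6 v7 v8 v9).getD "num_of_entities_with_more_than_eight_relationships" 0
          (pvMk t v1 v2 v3 v4 v5 v6 v7 v8 v9).insert "num_of_entities_with_more_than_eight_relationships" (temp_val + 1)) = pvMk t v1 v2 v3 v4 v5 v6 (v7+1) v8 v9 := by
        apply PySem.Dict.ext
        simp [pvMk, h, pvKeyNameDict_mk, PySem.Dict.items_insert, PySem.Dict.getD,
          PySem.Dict.get?, PySem.Dict.contains]
      rw [List.foldl_cons, hstep, ih]
      have hb : pvBucket p.2 = 7 := by simp [pvBucket, h]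
      simp [pvMk, List.map_cons, hb]
      omega
    · have hstep : (let num_of_relationships : Int := (p.2.length : Int)
        if pvKeyNameDict.contains num_of_relationships then
          let key_name : String := (pvKeyNameDict.get? num_of_relationships).getD ""
          let temp_val : Int := (pvMk t v1 v2 v3 v4 v5 v6 v7 v8 v9).getD key_name 0
          (pvMk t v1 v2 v3 v4 v5 v6 v7 v8 v9).insert ((pvKeyNameDict.get? ((p.2.length : Int))).getD "") (temp_val + 1)
        else
          let temp_val : Int := (pvMk t v1 v2 v3 v4 v5 v6 v7 v8 v9).getD "num_of_entities_with_more_than_eight_relationships" 0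
          (pvMk t v1 v2 v3 v4 v5 v6 v7 v8 v9).insert "num_of_entities_with_more_than_eight_relationships" (temp_val + 1)) = pvMk t v1 v2 v3 v4 v5 v6 v7 (v8+1) v9 := by
        apply PySem.Dict.ext
        simp [pvMk, h, pvKeyNameDict_mk, PySem.Dict.items_insert, PySem.Dict.getD,
          PySem.Dict.get?, PySem.Dict.contains]
      rw [List.foldl_cons, hstep, ih]
      have hb : pvBucket p.2 = 8 := by simp [pvBucket, h]
      simp [pvMk, List.map_cons, hb]
      omega
    · have hc : pvKeyNameDict.contains ((p.2.length : Int)) = false := by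
        rw [pvKeyNameDict_mk]; simp; omega
      have hstep : (let num_of_relationships : Int := (p.2.length : Int)
        if pvKeyNameDict.contains num_of_relationships then
          let key_name : String := (pvKeyNameDict.get? num_of_relationships).getD ""
          let temp_val : Int := (pvMk t v1 v2 v3 v4 v5 v6 v7 v8 v9).getD key_name 0
          (pvMk t v1 v2 v3 v4 v5 v6 v7 v8 v9).insert ((pvKeyNameDict.get? ((p.2.length : Int))).getD "") (temp_val + 1)
        else
          let temp_val : Int := (pvMk t v1 v2 v3 v4 v5 v6 v7 v8 v9).getD "num_of_entities_with_more_than_eight_relationships" 0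
          (pvMk t v1 v2 v3 v4 v5 v6 v7 v8 v9).insert "num_of_entities_with_more_than_eight_relationships" (temp_val + 1)) = pvMk t v1 v2 v3 v4 v5 v6 v7 v8 (v9+1) := by
        apply PySem.Dict.ext
        simp only [hc, Bool.false_eq_true, if_false]
        simp [pvMk, PySem.Dict.items_insert, PySem.Dict.getD, PySem.Dict.get?,
          PySem.Dict.contains]
      rw [List.foldl_cons, hstep, ih]
      have hb : pvBucket p.2 = 0 := by simp [pvBucket, h]
      simp [pvMk, List.map_cons, hb]
      omega
    · have hc : pvKeyNameDict.contains ((p.2.length : Int)) = false := by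
        rw [pvKeyNameDict_mk]; simp; omega
      have hstep : (let num_of_relationships : Int := (p.2.length : Int)
        if pvKeyNameDict.contains num_of_relationships then
          let key_name : String := (pvKeyNameDict.get? num_of_relationships).getD ""
          let temp_val : Int := (pvMk t v1 v2 v3 v4 v5 v6 v7 v8 v9).getD key_name 0
          (pvMk t v1 v2 v3 v4 v5 v6 v7 v8 v9).insert ((pvKeyNameDict.get? ((p.2.length : Int))).getD "") (temp_val + 1)
        else
          let temp_val : Int := (pvMk t v1 v2 v3 v4 v5 v6 v7 v8 v9).getD "num_of_entities_with_more_than_eight_relationships" 0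
          (pvMk t v1 v2 v3 v4 v5 v6 v7 v8 v9).insert "num_of_entities_with_more_than_eight_relationships" (temp_val + 1)) = pvMk t v1 v2 v3 v4 v5 v6 v7 v8 (v9+1) := by
        apply PySem.Dict.ext
        simp only [hc, Bool.false_eq_true, if_false]
        simp [pvMk, PySem.Dict.items_insert, PySem.Dict.getD, PySem.Dict.get?,
          PySem.Dict.contains]
      rw [List.foldl_cons, hstep, ih]
      have hb : pvBucket p.2 = 0 := by simp [pvBucket]; omega
      simp [pvMk, List.map_cons, hb]
      omega

theorem pv_init_insert (n : Int) :
    (PySem.Dict.ofList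
      [("total_num_of_entities", (0:Int)),
       ("num_of_entities_with_one_relationship", 0),
       ("num_of_entities_with_two_relationships", 0),
       ("num_of_entities_with_three_relationships", 0),
       ("num_of_entities_with_four_relationships", 0),
       ("num_of_entities_with_five_relationships", 0),
       ("num_of_entities_with_six_relationships", 0),
       ("num_of_entities_with_seven_relationships", 0),
       ("num_of_entities_with_eight_relationships", 0),
       ("num_of_entities_with_more_than_eight_relationships", 0)]).insert
      "total_num_of_entities" n = pvMk n 0 0 0 0 0 0 0 0 0 := by
  apply PySem.Dict.ext
  simp [pvMk, PySem.Dict.items_insert, PySem.Dict.contains,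
    show PySem.Dict.ofList
      [("total_num_of_entities", (0:Int)),
       ("num_of_entities_with_one_relationship", 0),
       ("num_of_entities_with_two_relationships", 0),
       ("num_of_entities_with_three_relationships", 0),
       ("num_of_entities_with_four_relationships", 0),
       ("num_of_entities_with_five_relationships", 0),
       ("num_of_entities_with_six_relationships", 0),
       ("num_of_entities_with_seven_relationships", 0),
       ("num_of_entities_with_eight_relationships", 0),
       ("num_of_entities_with_more_than_eight_relationships", 0)] = pvMk 0 0 0 0 0 0 0 0 0 0 from by rfl]

-- bridge 1: on buckets 1..8 the bucket-label count equals the plain length count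
theorem pv_count_bucket_eq (l : List (String × List String)) (i : Int) (h1 : 1 ≤ i) (h8 : i ≤ 8) :
    (l.map (fun p => pvBucket p.2)).count i = (l.map (fun p => ((p.2.length : Int)))).count i := by
  induction l with
  | nil => rfl
  | cons p l ih =>
    simp only [List.map_cons, List.count_cons, ih]
    by_cases hb : 1 ≤ ((p.2.length : Int)) ∧ ((p.2.length : Int)) ≤ 8
    · simp [pvBucket, hb]
    · have h0 : pvBucket p.2 = 0 := by simp only [pvBucket, if_neg hb]
      have hz : ¬ ((0:Int) = i) := by omega
      have hl : ¬ (((p.2.length : Int)) = i) := by omega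
      simp [h0, hz, hl]

-- bridge 2: the nine bucket counts partition the list
theorem pv_count_sum (l : List (String × List String)) :
    (l.map (fun p => pvBucket p.2)).count 0 + (l.map (fun p => pvBucket p.2)).count 1 +
    (l.map (fun p => pvBucket p.2)).count 2 + (l.map (fun p => pvBucket p.2)).count 3 +
    (l.map (fun p => pvBucket p.2)).count 4 + (l.map (fun p => pvBucket p.2)).count 5 +
    (l.map (fun p => pvBucket p.2)).count 6 + (l.map (fun p => pvBucket p.2)).count 7 +
    (l.map (fun p => pvBucket p.2)).count 8 = l.length := by
  induction l with
  | nil => rfl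
  | cons p l ih =>
    have hb : pvBucket p.2 = 0 ∨ pvBucket p.2 = 1 ∨ pvBucket p.2 = 2 ∨ pvBucket p.2 = 3 ∨
        pvBucket p.2 = 4 ∨ pvBucket p.2 = 5 ∨ pvBucket p.2 = 6 ∨ pvBucket p.2 = 7 ∨
        pvBucket p.2 = 8 := by
      simp only [pvBucket]; split_ifs with h <;> omega
    rcases hb with h|h|h|h|h|h|h|h|h <;> simp [h] <;> omega

-- ===== VERDICT (by name: the statement is the Claim_ definition above) =====
theorem get_entity_status_dic_spec : Claim_equal_get_entity_status_dic := by
  intro l _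
  unfold Spec_get_entity_status_dic
  simp only [get_entity_status_dic, get_entity_status_dic_alt, PySem.List.count_eq]
  rw [pv_init_insert, pv_foldA_char]
  have e1 := pv_count_bucket_eq l 1 (by norm_num) (by norm_num)
  have e2 := pv_count_bucket_eq l 2 (by norm_num) (by norm_num)
  have e3 := pv_count_bucket_eq l 3 (by norm_num) (by norm_num)
  have e4 := pv_count_bucket_eq l 4 (by norm_num) (by norm_num)
  have e5 := pv_count_bucket_eq l 5 (by norm_num) (by norm_num)
  have e6 := pv_count_bucket_eq l 6 (by norm_num) (by norm_num)
  have e7 := pv_count_bucket_eq l 7 (by norm_num) (by norm_num)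
  have e8 := pv_count_bucket_eq l 8 (by norm_num) (by norm_num)
  have hs := pv_count_sum l
  simp only [pvMk, List.length_map, zero_add]
  simp only [List.cons.injEq, Prod.mk.injEq, and_true, true_and]
  refine ⟨by rw [e1], by rw [e2], by rw [e3], by rw [e4], by rw [e5], by rw [e6], by rw [e7],
    by rw [e8], ?_⟩
  rw [← e1, ← e2, ← e3, ← e4, ← e5, ← e6, ← e7, ← e8]
  omega
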